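-- pv_equiv track=rewrite | github.com/MissMeriel/DeepManeuver | analysis/process-results3.py | get_outcomes
-- ===== SOURCE A (Python) =====
-- def get_outcomes(results):
--     outcomes_percents = {"B":0, "D":0, "LT":0, "R2NT":0, "2FAR":0, 'GOAL':0}
--     for outcome in results['testruns_outcomes']:
--         if "BULLSEYE-D" in outcome:
--             outcomes_percents["B"] += 1
--         elif "GOAL" in outcome:
--             outcomes_percents["GOAL"] += 1
--         elif "D=" in outcome:
--             outcomes_percents["D"] += 1
--         elif "R2NT" in outcome:
--             outcomes_percents["R2NT"] +=1
--         elif "LT" in outcome: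
--             outcomes_percents["LT"] += 1
--         elif "2FAR" in outcome:
--             outcomes_percents["2FAR"] += 1
--     return outcomes_percents
-- ===== SOURCE B (Python) =====
-- def get_outcomes(results):
--     remaining = list(results['testruns_outcomes'])
--     counts = {}
--     for sub, key in [("BULLSEYE-D", "B"), ("GOAL", "GOAL"), ("D=", "D"),
--                      ("R2NT", "R2NT"), ("LT", "LT"), ("2FAR", "2FAR")]:
--         counts[key] = sum(sub in o for o in remaining)
--         remaining = [o for o in remaining if sub not in o]
--     return {k: counts[k] for k in ("B", "D", "LT", "R2NT", "2FAR", "GOAL")}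
-- ===== Notes on version B (the rewrite author's own statement) =====
-- stated objective: alternative
-- what changed: Replaces A's single per-outcome pass with an if/elif increment chain by staged per-pattern passes: for each (substring,label) in priority order B counts the matches in the remaining outcome list and then filters those matches out, so no outcome is ever classified element-by-element.
-- outside the precondition, e.g. on get_outcomes({'other_key': []}): A raises KeyError, B raises KeyError
import Mathlib
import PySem

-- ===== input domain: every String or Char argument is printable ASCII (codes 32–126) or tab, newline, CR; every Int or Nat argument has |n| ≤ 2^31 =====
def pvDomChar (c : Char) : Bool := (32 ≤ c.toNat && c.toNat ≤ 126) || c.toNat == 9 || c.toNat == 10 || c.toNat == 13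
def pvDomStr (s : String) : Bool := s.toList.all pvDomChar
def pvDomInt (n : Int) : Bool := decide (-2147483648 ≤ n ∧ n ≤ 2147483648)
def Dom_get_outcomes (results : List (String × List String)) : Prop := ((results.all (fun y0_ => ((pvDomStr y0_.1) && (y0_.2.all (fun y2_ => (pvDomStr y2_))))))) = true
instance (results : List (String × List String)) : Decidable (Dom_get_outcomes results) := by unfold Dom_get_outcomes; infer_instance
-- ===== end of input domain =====

-- B replaces A's per-outcome if/elif increment loop by staged per-pattern passes: for each
-- pattern in priority order it counts the matches in the remaining list and then filters
-- those matches out (objective: alternative decomposition, not faster).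

-- ===== PORT A =====
-- one step of A's loop body: the if/elif chain incrementing the matching counter
def pvStepA (d : PySem.Dict String Int) (o : String) : PySem.Dict String Int :=
  if PySem.Str.isIn "BULLSEYE-D" o then d.modify "B" 0 (· + 1)
  else if PySem.Str.isIn "GOAL" o then d.modify "GOAL" 0 (· + 1)
  else if PySem.Str.isIn "D=" o then d.modify "D" 0 (· + 1)
  else if PySem.Str.isIn "R2NT" o then d.modify "R2NT" 0 (· + 1)
  else if PySem.Str.isIn "LT" o then d.modify "LT" 0 (· + 1)
  else if PySem.Str.isIn "2FAR" o then d.modify "2FAR" 0 (· + 1)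
  else d

def get_outcomes (results : List (String × List String)) : List (String × Int) :=
  match results.lookup "testruns_outcomes" with
  | none => []   -- KeyError in Python; excluded by Pre_
  | some outcomes =>
    (outcomes.foldl pvStepA
      (PySem.Dict.ofList [("B", 0), ("D", 0), ("LT", 0), ("R2NT", 0), ("2FAR", 0), ("GOAL", 0)])).items

-- ===== PORT B =====
def pvPatterns : List (String × String) :=
  [("BULLSEYE-D", "B"), ("GOAL", "GOAL"), ("D=", "D"), ("R2NT", "R2NT"), ("LT", "LT"), ("2FAR", "2FAR")]

-- one iteration of B's pattern loop: record the count of matches among the remaining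
-- outcomes, then drop those matches from the remaining list
def pvStageStep (st : PySem.Dict String Int × List String) (p : String × String) :
    PySem.Dict String Int × List String :=
  (st.1.insert p.2 ((st.2.countP (fun o => PySem.Str.isIn p.1 o) : Nat) : Int),
   st.2.filter (fun o => !(PySem.Str.isIn p.1 o)))

def get_outcomes_alt (results : List (String × List String)) : List (String × Int) :=
  match results.lookup "testruns_outcomes" with
  | none => []   -- KeyError in Python; excluded by Pre_
  | some outcomes =>
    let st := pvPatterns.foldl pvStageStep (PySem.Dict.ofList [], outcomes)
    ["B", "D", "LT", "R2NT", "2FAR", "GOAL"].map (fun k => (k, st.1.getD k 0))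

-- ===== PRECONDITION & SPEC =====
-- Pre_ excludes only inputs without a 'testruns_outcomes' key, on which Python A raises KeyError.
def Pre_get_outcomes (results : List (String × List String)) : Prop :=
  "testruns_outcomes" ∈ results.map Prod.fst
instance (results : List (String × List String)) : Decidable (Pre_get_outcomes results) := by
  unfold Pre_get_outcomes; infer_instance
def pvWitness_get_outcomes : (List (String × List String)) :=
  [("testruns_outcomes", ["BULLSEYE-D hit", "GOAL", "LT timeout"])]

def Spec_get_outcomes (results : List (String × List String)) (out : List (String × Int)) : Prop := out = get_outcomes_alt results
instance (results : List (String × List String)) (out : List (String × Int)) : Decidable (Spec_get_outcomes results out) := by unfold Spec_get_outcomes; infer_instance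

-- ===== CLAIM (what is proved, stated in full; the proofs are below) =====
def Claim_equal_get_outcomes : Prop := ∀ (results : List (String × List String)), Dom_get_outcomes results → Pre_get_outcomes results → Spec_get_outcomes results (get_outcomes results)

-- ===== LEMMAS AND PROOFS =====

-- proof-side classifier: the label A's if/elif chain assigns to one outcome (first match)
def pvClassify (o : String) : Option String :=
  (pvPatterns.find? (fun p => PySem.Str.isIn p.1 o)).map (·.2)

-- count of the label k assigned by the chain, as an Int
def pvCnt (os : List String) (k : String) : Int := ((os.map pvClassify).count (some k) : Int)

theorem pvFold_items (os : List String) (b dd lt r f g : Int) :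
    (os.foldl pvStepA (PySem.Dict.mk [("B", b), ("D", dd), ("LT", lt), ("R2NT", r), ("2FAR", f), ("GOAL", g)])).items
      = [("B", b + pvCnt os "B"), ("D", dd + pvCnt os "D"), ("LT", lt + pvCnt os "LT"),
         ("R2NT", r + pvCnt os "R2NT"), ("2FAR", f + pvCnt os "2FAR"), ("GOAL", g + pvCnt os "GOAL")] := by
  induction os generalizing b dd lt r f g with
  | nil => simp [pvCnt]
  | cons o rest ih =>
    simp only [List.foldl_cons, pvStepA]
    by_cases h1 : PySem.Str.isIn "BULLSEYE-D" o = true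
    · rw [if_pos h1]
      have hd : (PySem.Dict.mk [("B", b), ("D", dd), ("LT", lt), ("R2NT", r), ("2FAR", f), ("GOAL", g)]).modify "B" 0 (· + 1)
          = PySem.Dict.mk [("B", b + 1), ("D", dd), ("LT", lt), ("R2NT", r), ("2FAR", f), ("GOAL", g)] := rfl
      rw [hd, ih]
      have h1' : PySem.Chars.isIn ['B', 'U', 'L', 'L', 'S', 'E', 'Y', 'E', '-', 'D'] o.toList = true := by simpa using h1
      have hc : pvClassify o = some "B" := by
        simp [pvClassify, pvPatterns, h1']
      simp [pvCnt, List.map_cons, hc]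
      omega
    by_cases h2 : PySem.Str.isIn "GOAL" o = true
    · rw [if_neg h1, if_pos h2]
      have hd : (PySem.Dict.mk [("B", b), ("D", dd), ("LT", lt), ("R2NT", r), ("2FAR", f), ("GOAL", g)]).modify "GOAL" 0 (· + 1)
          = PySem.Dict.mk [("B", b), ("D", dd), ("LT", lt), ("R2NT", r), ("2FAR", f), ("GOAL", g + 1)] := rfl
      rw [hd, ih]
      have h1' : PySem.Chars.isIn ['B', 'U', 'L', 'L', 'S', 'E', 'Y', 'E', '-', 'D'] o.toList = false := by simpa using h1
      have h2' : PySem.Chars.isIn ['G', 'O', 'A', 'L'] o.toList = true := by simpa using h2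
      have hc : pvClassify o = some "GOAL" := by
        simp [pvClassify, pvPatterns, List.find?, h1', h2']
      simp [pvCnt, List.map_cons, hc]
      omega
    by_cases h3 : PySem.Str.isIn "D=" o = true
    · rw [if_neg h1, if_neg h2, if_pos h3]
      have hd : (PySem.Dict.mk [("B", b), ("D", dd), ("LT", lt), ("R2NT", r), ("2FAR", f), ("GOAL", g)]).modify "D" 0 (· + 1)
          = PySem.Dict.mk [("B", b), ("D", dd + 1), ("LT", lt), ("R2NT", r), ("2FAR", f), ("GOAL", g)] := rfl
      rw [hd, ih]
      have h1' : PySem.Chars.isIn ['B', 'U', 'L', 'L', 'S', 'E', 'Y', 'E', '-', 'D'] o.toList = false := by simpa using h1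
      have h2' : PySem.Chars.isIn ['G', 'O', 'A', 'L'] o.toList = false := by simpa using h2
      have h3' : PySem.Chars.isIn ['D', '='] o.toList = true := by simpa using h3
      have hc : pvClassify o = some "D" := by
        simp [pvClassify, pvPatterns, List.find?, h1', h2', h3']
      simp [pvCnt, List.map_cons, hc]
      omega
    by_cases h4 : PySem.Str.isIn "R2NT" o = true
    · rw [if_neg h1, if_neg h2, if_neg h3, if_pos h4]
      have hd : (PySem.Dict.mk [("B", b), ("D", dd), ("LT", lt), ("R2NT", r), ("2FAR", f), ("GOAL", g)]).modify "R2NT" 0 (· + 1)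
          = PySem.Dict.mk [("B", b), ("D", dd), ("LT", lt), ("R2NT", r + 1), ("2FAR", f), ("GOAL", g)] := rfl
      rw [hd, ih]
      have h1' : PySem.Chars.isIn ['B', 'U', 'L', 'L', 'S', 'E', 'Y', 'E', '-', 'D'] o.toList = false := by simpa using h1
      have h2' : PySem.Chars.isIn ['G', 'O', 'A', 'L'] o.toList = false := by simpa using h2
      have h3' : PySem.Chars.isIn ['D', '='] o.toList = false := by simpa using h3
      have h4' : PySem.Chars.isIn ['R', '2', 'N', 'T'] o.toList = true := by simpa using h4
      have hc : pvClassify o = some "R2NT" := by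
        simp [pvClassify, pvPatterns, List.find?, h1', h2', h3', h4']
      simp [pvCnt, List.map_cons, hc]
      omega
    by_cases h5 : PySem.Str.isIn "LT" o = true
    · rw [if_neg h1, if_neg h2, if_neg h3, if_neg h4, if_pos h5]
      have hd : (PySem.Dict.mk [("B", b), ("D", dd), ("LT", lt), ("R2NT", r), ("2FAR", f), ("GOAL", g)]).modify "LT" 0 (· + 1)
          = PySem.Dict.mk [("B", b), ("D", dd), ("LT", lt + 1), ("R2NT", r), ("2FAR", f), ("GOAL", g)] := rfl
      rw [hd, ih]
      have h1' : PySem.Chars.isIn ['B', 'U', 'L', 'L', 'S', 'E', 'Y', 'E', '-', 'D'] o.toList = false := by simpa using h1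
      have h2' : PySem.Chars.isIn ['G', 'O', 'A', 'L'] o.toList = false := by simpa using h2
      have h3' : PySem.Chars.isIn ['D', '='] o.toList = false := by simpa using h3
      have h4' : PySem.Chars.isIn ['R', '2', 'N', 'T'] o.toList = false := by simpa using h4
      have h5' : PySem.Chars.isIn ['L', 'T'] o.toList = true := by simpa using h5
      have hc : pvClassify o = some "LT" := by
        simp [pvClassify, pvPatterns, List.find?, h1', h2', h3', h4', h5']
      simp [pvCnt, List.map_cons, hc]
      omega
    by_cases h6 : PySem.Str.isIn "2FAR" o = true
    · rw [if_neg h1, if_neg h2, if_neg h3, if_neg h4, if_neg h5, if_pos h6]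
      have hd : (PySem.Dict.mk [("B", b), ("D", dd), ("LT", lt), ("R2NT", r), ("2FAR", f), ("GOAL", g)]).modify "2FAR" 0 (· + 1)
          = PySem.Dict.mk [("B", b), ("D", dd), ("LT", lt), ("R2NT", r), ("2FAR", f + 1), ("GOAL", g)] := rfl
      rw [hd, ih]
      have h1' : PySem.Chars.isIn ['B', 'U', 'L', 'L', 'S', 'E', 'Y', 'E', '-', 'D'] o.toList = false := by simpa using h1
      have h2' : PySem.Chars.isIn ['G', 'O', 'A', 'L'] o.toList = false := by simpa using h2
      have h3' : PySem.Chars.isIn ['D', '='] o.toList = false := by simpa using h3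
      have h4' : PySem.Chars.isIn ['R', '2', 'N', 'T'] o.toList = false := by simpa using h4
      have h5' : PySem.Chars.isIn ['L', 'T'] o.toList = false := by simpa using h5
      have h6' : PySem.Chars.isIn ['2', 'F', 'A', 'R'] o.toList = true := by simpa using h6
      have hc : pvClassify o = some "2FAR" := by
        simp [pvClassify, pvPatterns, List.find?, h1', h2', h3', h4', h5', h6']
      simp [pvCnt, List.map_cons, hc]
      omega
    rw [if_neg h1, if_neg h2, if_neg h3, if_neg h4, if_neg h5, if_neg h6, ih]
    have h1' : PySem.Chars.isIn ['B', 'U', 'L', 'L', 'S', 'E', 'Y', 'E', '-', 'D'] o.toList = false := by simpa using h1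
    have h2' : PySem.Chars.isIn ['G', 'O', 'A', 'L'] o.toList = false := by simpa using h2
    have h3' : PySem.Chars.isIn ['D', '='] o.toList = false := by simpa using h3
    have h4' : PySem.Chars.isIn ['R', '2', 'N', 'T'] o.toList = false := by simpa using h4
    have h5' : PySem.Chars.isIn ['L', 'T'] o.toList = false := by simpa using h5
    have h6' : PySem.Chars.isIn ['2', 'F', 'A', 'R'] o.toList = false := by simpa using h6
    have hc : pvClassify o = none := by
      simp [pvClassify, pvPatterns, List.find?, h1', h2', h3', h4', h5', h6']
    simp [pvCnt, List.map_cons, hc]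

-- pvCnt over a cons: the head contributes 1 exactly to its first-match label
theorem pvCnt_cons (o : String) (rest : List String) (k : String) :
    pvCnt (o :: rest) k = pvCnt rest k + (if pvClassify o = some k then 1 else 0) := by
  by_cases h : pvClassify o = some k <;>
    simp [pvCnt, List.map_cons, List.count_cons, h] <;> omega

-- B's staged per-pattern counts coincide with the per-outcome first-match counts
-- (stated in the fused-filter normal form the final goal takes)
theorem pvStaged_eq (os : List String) :
    pvCnt os "B" =
      ((os.countP (fun o => PySem.Chars.isIn ['B', 'U', 'L', 'L', 'S', 'E', 'Y', 'E', '-', 'D'] o.toList) : Nat) : Int) ∧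
    pvCnt os "GOAL" =
      (((os.filter (fun o => !PySem.Chars.isIn ['B', 'U', 'L', 'L', 'S', 'E', 'Y', 'E', '-', 'D'] o.toList)).countP (fun o => PySem.Chars.isIn ['G', 'O', 'A', 'L'] o.toList) : Nat) : Int) ∧
    pvCnt os "D" =
      (((os.filter (fun a => !PySem.Chars.isIn ['G', 'O', 'A', 'L'] a.toList && !PySem.Chars.isIn ['B', 'U', 'L', 'L', 'S', 'E', 'Y', 'E', '-', 'D'] a.toList)).countP (fun o => PySem.Chars.isIn ['D', '='] o.toList) : Nat) : Int) ∧
    pvCnt os "R2NT" =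
      (((os.filter (fun a => !PySem.Chars.isIn ['D', '='] a.toList && (!PySem.Chars.isIn ['G', 'O', 'A', 'L'] a.toList && !PySem.Chars.isIn ['B', 'U', 'L', 'L', 'S', 'E', 'Y', 'E', '-', 'D'] a.toList))).countP (fun o => PySem.Chars.isIn ['R', '2', 'N', 'T'] o.toList) : Nat) : Int) ∧
    pvCnt os "LT" =
      (((os.filter (fun a => !PySem.Chars.isIn ['R', '2', 'N', 'T'] a.toList && (!PySem.Chars.isIn ['D', '='] a.toList && (!PySem.Chars.isIn ['G', 'O', 'A', 'L'] a.toList && !PySem.Chars.isIn ['B', 'U', 'L', 'L', 'S', 'E', 'Y', 'E', '-', 'D'] a.toList)))).countP (fun o => PySem.Chars.isIn ['L', 'T'] o.toList) : Nat) : Int) ∧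
    pvCnt os "2FAR" =
      (((os.filter (fun a => !PySem.Chars.isIn ['L', 'T'] a.toList && (!PySem.Chars.isIn ['R', '2', 'N', 'T'] a.toList && (!PySem.Chars.isIn ['D', '='] a.toList && (!PySem.Chars.isIn ['G', 'O', 'A', 'L'] a.toList && !PySem.Chars.isIn ['B', 'U', 'L', 'L', 'S', 'E', 'Y', 'E', '-', 'D'] a.toList))))).countP (fun o => PySem.Chars.isIn ['2', 'F', 'A', 'R'] o.toList) : Nat) : Int) := by
  induction os with
  | nil => simp [pvCnt]
  | cons o rest ih =>
    obtain ⟨i1, i2, i3, i4, i5, i6⟩ := ih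
    by_cases h1 : PySem.Chars.isIn ['B', 'U', 'L', 'L', 'S', 'E', 'Y', 'E', '-', 'D'] o.toList = true
    · have hc : pvClassify o = some "B" := by
        simp [pvClassify, pvPatterns, PySem.Str.isIn, h1]
      refine ⟨?_, ?_, ?_, ?_, ?_, ?_⟩ <;>
        simp [pvCnt_cons, hc, List.filter_cons, List.countP_cons, h1, i1, i2, i3, i4, i5, i6]
    by_cases h2 : PySem.Chars.isIn ['G', 'O', 'A', 'L'] o.toList = true
    · have hc : pvClassify o = some "GOAL" := by
        simp [pvClassify, pvPatterns, PySem.Str.isIn, List.find?, h1, h2]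
      refine ⟨?_, ?_, ?_, ?_, ?_, ?_⟩ <;>
        simp [pvCnt_cons, hc, List.filter_cons, List.countP_cons, h1, h2, i1, i2, i3, i4, i5, i6]
    by_cases h3 : PySem.Chars.isIn ['D', '='] o.toList = true
    · have hc : pvClassify o = some "D" := by
        simp [pvClassify, pvPatterns, PySem.Str.isIn, List.find?, h1, h2, h3]
      refine ⟨?_, ?_, ?_, ?_, ?_, ?_⟩ <;>
        simp [pvCnt_cons, hc, List.filter_cons, List.countP_cons, h1, h2, h3, i1, i2, i3, i4, i5, i6]
    by_cases h4 : PySem.Chars.isIn ['R', '2', 'N', 'T'] o.toList = true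
    · have hc : pvClassify o = some "R2NT" := by
        simp [pvClassify, pvPatterns, PySem.Str.isIn, List.find?, h1, h2, h3, h4]
      refine ⟨?_, ?_, ?_, ?_, ?_, ?_⟩ <;>
        simp [pvCnt_cons, hc, List.filter_cons, List.countP_cons, h1, h2, h3, h4, i1, i2, i3, i4, i5, i6]
    by_cases h5 : PySem.Chars.isIn ['L', 'T'] o.toList = true
    · have hc : pvClassify o = some "LT" := by
        simp [pvClassify, pvPatterns, PySem.Str.isIn, List.find?, h1, h2, h3, h4, h5]
      refine ⟨?_, ?_, ?_, ?_, ?_, ?_⟩ <;>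
        simp [pvCnt_cons, hc, List.filter_cons, List.countP_cons, h1, h2, h3, h4, h5, i1, i2, i3, i4, i5, i6]
    by_cases h6 : PySem.Chars.isIn ['2', 'F', 'A', 'R'] o.toList = true
    · have hc : pvClassify o = some "2FAR" := by
        simp [pvClassify, pvPatterns, PySem.Str.isIn, List.find?, h1, h2, h3, h4, h5, h6]
      refine ⟨?_, ?_, ?_, ?_, ?_, ?_⟩ <;>
        simp [pvCnt_cons, hc, List.filter_cons, List.countP_cons, h1, h2, h3, h4, h5, h6, i1, i2, i3, i4, i5, i6]
    have hc : pvClassify o = none := by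
      simp [pvClassify, pvPatterns, PySem.Str.isIn, List.find?, h1, h2, h3, h4, h5, h6]
    refine ⟨?_, ?_, ?_, ?_, ?_, ?_⟩ <;>
      simp [pvCnt_cons, hc, List.filter_cons, List.countP_cons, h1, h2, h3, h4, h5, h6, i1, i2, i3, i4, i5, i6]

-- ===== VERDICT (by name: the statement is the Claim_ definition above) =====
theorem get_outcomes_spec : Claim_equal_get_outcomes := by
  intro results _ hpre
  unfold Spec_get_outcomes get_outcomes get_outcomes_alt
  cases hlk : results.lookup "testruns_outcomes" with
  | none =>
    exfalso
    simp only [Pre_get_outcomes] at hpre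
    simp at hlk
    simp [List.mem_map] at hpre
    obtain ⟨x, hx⟩ := hpre
    exact hlk _ _ hx rfl
  | some outcomes =>
    have h0 : PySem.Dict.ofList ([("B", (0:Int)), ("D", 0), ("LT", 0), ("R2NT", 0), ("2FAR", 0), ("GOAL", 0)])
        = PySem.Dict.mk [("B", 0), ("D", 0), ("LT", 0), ("R2NT", 0), ("2FAR", 0), ("GOAL", 0)] := by decide
    obtain ⟨e1, e2, e3, e4, e5, e6⟩ := pvStaged_eq outcomes
    simp only [h0, pvFold_items, pvPatterns, List.foldl_cons, List.foldl_nil, pvStageStep,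
      List.map_cons, List.map_nil]
    simp [PySem.Dict.getD_insert]
    exact ⟨e1, e3, e5, e4, e6, e2⟩
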